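-- pv_equiv track=rewrite | github.com/hodayagradwohl/BlockAutomaton | glider_automaton.py | get_block_coords
-- ===== SOURCE A (Python) =====
-- def get_block_coords(size, phase, wraparound):
--     """
--     Determine the starting coordinates for the blocks to update in the current phase.
--     """
--     coords = []
--     start = 0 if phase % 2 == 1 else 1
--     for i in range(start, size, 2):
--         for j in range(start, size, 2):
--             if wraparound or (i + 1 < size and j + 1 < size):
--                 coords.append((i, j))
--     return coords
-- ===== SOURCE B (Python) =====
-- def get_block_coords(size, phase, wraparound):
--     start = 0 if phase % 2 == 1 else 1
--     limit = size if wraparound else size - 1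
--     n = (limit - start + 1) // 2 if start < limit else 0
--     return [(start + 2 * (t // n), start + 2 * (t % n)) for t in range(n * n)]
-- ===== Notes on version B (the rewrite author's own statement) =====
-- stated objective: alternative
-- what changed: Replaces the nested grid scan with a per-cell bound test by pure arithmetic: a closed-form count n of valid axis positions, then each of the n*n coordinates is decoded directly from its rank by divmod, so no grid cell is ever visited or tested.
import Mathlib
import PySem

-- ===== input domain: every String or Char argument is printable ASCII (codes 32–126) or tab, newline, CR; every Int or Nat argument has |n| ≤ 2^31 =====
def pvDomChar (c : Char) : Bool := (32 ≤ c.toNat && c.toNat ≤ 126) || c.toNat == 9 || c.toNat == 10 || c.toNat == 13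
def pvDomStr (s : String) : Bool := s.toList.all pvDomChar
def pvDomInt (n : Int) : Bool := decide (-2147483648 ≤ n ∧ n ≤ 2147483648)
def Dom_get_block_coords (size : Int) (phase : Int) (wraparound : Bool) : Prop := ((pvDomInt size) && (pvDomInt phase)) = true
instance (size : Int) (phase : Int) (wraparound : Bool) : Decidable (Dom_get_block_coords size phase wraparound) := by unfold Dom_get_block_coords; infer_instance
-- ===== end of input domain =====

-- B replaces A's nested grid scan (a bound test at every cell) by pure arithmetic: a
-- closed-form count n of valid axis positions, then each of the n*n coordinates is
-- decoded from its rank t by divmod; objective: alternative (no cell is visited or tested).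

-- ===== PORT A =====
def get_block_coords (size : Int) (phase : Int) (wraparound : Bool) : List (Int × Int) :=
  let start : Int := if PySem.Int.mod phase 2 = 1 then 0 else 1
  (PySem.List.pyRange start size 2).foldl (fun coords i =>
    (PySem.List.pyRange start size 2).foldl (fun coords j =>
      if wraparound || (decide (i + 1 < size) && decide (j + 1 < size)) then
        coords ++ [(i, j)]
      else coords) coords) []

-- ===== PORT B =====
def get_block_coords_alt (size : Int) (phase : Int) (wraparound : Bool) : List (Int × Int) :=
  let start : Int := if PySem.Int.mod phase 2 = 1 then 0 else 1
  let limit : Int := if wraparound then size else size - 1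
  let n : Int := if start < limit then PySem.Int.floordiv (limit - start + 1) 2 else 0
  (PySem.List.pyRange 0 (n * n) 1).map (fun t =>
    (start + 2 * PySem.Int.floordiv t n, start + 2 * PySem.Int.mod t n))

-- ===== PRECONDITION & SPEC =====
def Spec_get_block_coords (size : Int) (phase : Int) (wraparound : Bool) (out : List (Int × Int)) : Prop := out = get_block_coords_alt size phase wraparound
instance (size : Int) (phase : Int) (wraparound : Bool) (out : List (Int × Int)) : Decidable (Spec_get_block_coords size phase wraparound out) := by unfold Spec_get_block_coords; infer_instance

-- ===== CLAIM (what is proved, stated in full; the proofs are below) =====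
def Claim_equal_get_block_coords : Prop := ∀ (size : Int) (phase : Int) (wraparound : Bool), Dom_get_block_coords size phase wraparound → Spec_get_block_coords size phase wraparound (get_block_coords size phase wraparound)

-- ===== LEMMAS AND PROOFS =====

-- range N truncated by a bound M ≤ N is range M
theorem pvFilter_range (N M : Nat) (h : M ≤ N) :
    (List.range N).filter (fun b => decide (b < M)) = List.range M := by
  rw [← Nat.add_sub_cancel' h, List.range_add, List.filter_append]
  rw [List.filter_eq_self.mpr, List.filter_eq_nil_iff.mpr, List.append_nil]
  · intro a ha; simp at ha ⊢; omega
  · intro a ha; simp [List.mem_range] at ha; simpa using ha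

-- rank decoding: the ranks 0..a*n-1 read by divmod give the row-major product
theorem pvGrid {β : Type} (h : Nat → Nat → β) (n : Nat) : ∀ (a : Nat),
    (List.range (a * n)).map (fun t => h (t / n) (t % n))
      = (List.range a).flatMap (fun i => (List.range n).map (fun j => h i j)) := by
  cases n with
  | zero => intro a; simp
  | succ m =>
    intro a
    induction a with
    | zero => simp
    | succ a ih =>
      rw [show List.range (a+1) = List.range a ++ [a] from List.range_succ,
          List.flatMap_append, ← ih, Nat.succ_mul, List.range_add, List.map_append]
      congr 1
      rw [List.map_map]
      simp only [List.flatMap_cons, List.flatMap_nil, List.append_nil]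
      apply List.map_congr_left
      intro j hj
      simp only [List.mem_range] at hj
      simp only [Function.comp_apply]
      have h1 : (a * (m+1) + j) / (m+1) = a := by
        rw [Nat.mul_comm, Nat.mul_add_div (by omega), Nat.div_eq_of_lt (by omega), Nat.add_zero]
      have h2 : (a * (m+1) + j) % (m+1) = j := by
        rw [Nat.mul_comm, Nat.mul_add_mod, Nat.mod_eq_of_lt (by omega)]
      rw [h1, h2]

-- A's filtered double scan over (range N).map g equals B's divmod decoding of the M*M ranks
theorem pvKey {g : Nat → Int} {p : Int → Bool} {N M : Nat} (hM : M ≤ N)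
    (hp : ∀ k, k < N → p (g k) = decide (k < M)) :
    ((List.range N).map g).flatMap (fun i =>
        (((List.range N).map g).filter (fun j => p i && p j)).map (fun j => (i, j)))
      = (List.range (M * M)).map (fun t => (g (t / M), g (t % M))) := by
  rw [List.flatMap_map, pvGrid (fun i j => (g i, g j)) M M]
  have hInner : ∀ a ∈ List.range N,
      (((List.range N).map g).filter (fun j => p (g a) && p j)).map (fun j => (g a, j))
        = if a < M then (List.range M).map (fun b => (g a, g b)) else [] := by
    intro a ha
    rw [List.mem_range] at ha
    rw [List.filter_map]
    by_cases haM : a < M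
    · rw [if_pos haM]
      have h1 : (List.range N).filter ((fun j => p (g a) && p j) ∘ g) = List.range M := by
        rw [List.filter_congr (fun b hb => ?_), pvFilter_range N M hM]
        simp only [Function.comp_apply, hp a ha, hp b (List.mem_range.mp hb)]
        simp [haM]
      rw [h1, List.map_map]; rfl
    · rw [if_neg haM]
      have h0 : (List.range N).filter ((fun j => p (g a) && p j) ∘ g) = [] := by
        apply List.filter_eq_nil_iff.mpr
        intro b _
        simp only [Function.comp_apply, hp a ha]
        simp [haM]
      rw [h0, List.map_nil, List.map_nil]
  rw [List.flatMap_congr hInner]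
  rw [show List.range N = List.range M ++ ((List.range (N - M)).map (fun x => M + x)) by
        rw [← List.range_add, Nat.add_sub_cancel' hM]]
  rw [List.flatMap_append]
  rw [show ((List.range (N - M)).map (fun x => M + x)).flatMap
        (fun a => if a < M then (List.range M).map (fun b => (g a, g b)) else []) = [] by
      apply List.flatMap_eq_nil_iff.mpr
      intro a ha
      simp only [List.mem_map, List.mem_range] at ha
      obtain ⟨x, _, rfl⟩ := ha
      rw [if_neg (by omega)]]
  rw [List.append_nil]
  apply List.flatMap_congr
  intro a ha
  rw [List.mem_range] at ha
  rw [if_pos ha]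

-- ===== VERDICT (by name: the statement is the Claim_ definition above) =====
theorem get_block_coords_spec : Claim_equal_get_block_coords := by
  intro size phase w _
  unfold Spec_get_block_coords get_block_coords get_block_coords_alt
  simp only [PySem.List.foldl_append_if, PySem.List.foldl_append_eq_flatMap, List.nil_append]
  set st := (if PySem.Int.mod phase 2 = 1 then (0:Int) else 1) with hst
  have hRange : PySem.List.pyRange st size 2
      = (List.range ((size - st + 1) / 2).toNat).map (fun k : Nat => st + 2 * (k : Int)) := by
    rw [PySem.List.pyRange_of_pos st size (by norm_num),
        show (if st < size then ((size - st + 2 - 1) / 2).toNat else 0)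
          = ((size - st + 1) / 2).toNat from by split_ifs <;> omega]
  cases w
  · -- wraparound = False: valid axis positions are those with i + 1 < size
    simp only [Bool.false_or, Bool.false_eq_true, reduceIte]
    have hn : (if st < size - 1 then PySem.Int.floordiv (size - 1 - st + 1) 2 else 0)
        = (((size - st) / 2).toNat : Int) := by
      split_ifs with h
      · rw [PySem.Int.floordiv_eq_ediv_of_pos (by norm_num)]; omega
      · omega
    rw [hRange, hn,
        show (((size - st) / 2).toNat : Int) * (((size - st) / 2).toNat : Int)
          = ((((size - st) / 2).toNat * ((size - st) / 2).toNat : Nat) : Int) from by push_cast; ring,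
        PySem.List.pyRange_zero_nat, List.map_map]
    have hMN : ((size - st) / 2).toNat ≤ ((size - st + 1) / 2).toNat := by omega
    have hp : ∀ k, k < ((size - st + 1) / 2).toNat →
        ((fun x : Int => decide (x + 1 < size)) (st + 2 * (k : Int)))
          = decide (k < ((size - st) / 2).toNat) := by
      intro k hk
      simp only [decide_eq_decide]
      omega
    calc ((List.range ((size - st + 1) / 2).toNat).map (fun k : Nat => st + 2 * (k : Int))).flatMap
          (fun i => (((List.range ((size - st + 1) / 2).toNat).map
              (fun k : Nat => st + 2 * (k : Int))).filter
                (fun j => decide (i + 1 < size) && decide (j + 1 < size))).map (fun j => (i, j)))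
        = (List.range (((size - st) / 2).toNat * ((size - st) / 2).toNat)).map (fun t =>
            (st + 2 * ((t / ((size - st) / 2).toNat : Nat) : Int),
             st + 2 * ((t % ((size - st) / 2).toNat : Nat) : Int))) :=
          pvKey (g := fun k : Nat => st + 2 * (k : Int))
                (p := fun x : Int => decide (x + 1 < size)) hMN hp
      _ = _ := by
          apply List.map_congr_left
          intro t _
          simp only [Function.comp_apply, PySem.Int.floordiv_natCast, PySem.Int.mod_natCast]
  · -- wraparound = True: every axis position is valid
    simp only [Bool.true_or, reduceIte]
    have hn : (if st < size then PySem.Int.floordiv (size - st + 1) 2 else 0)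
        = (((size - st + 1) / 2).toNat : Int) := by
      split_ifs with h
      · rw [PySem.Int.floordiv_eq_ediv_of_pos (by norm_num)]; omega
      · omega
    rw [hRange, hn,
        show (((size - st + 1) / 2).toNat : Int) * (((size - st + 1) / 2).toNat : Int)
          = ((((size - st + 1) / 2).toNat * ((size - st + 1) / 2).toNat : Nat) : Int) from by
          push_cast; ring,
        PySem.List.pyRange_zero_nat, List.map_map]
    have hp : ∀ k, k < ((size - st + 1) / 2).toNat →
        ((fun _ : Int => true) (st + 2 * (k : Int)))
          = decide (k < ((size - st + 1) / 2).toNat) := by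
      intro k hk
      simp [hk]
    calc ((List.range ((size - st + 1) / 2).toNat).map (fun k : Nat => st + 2 * (k : Int))).flatMap
          (fun i => (((List.range ((size - st + 1) / 2).toNat).map
              (fun k : Nat => st + 2 * (k : Int))).filter (fun _ => true)).map (fun j => (i, j)))
        = (List.range (((size - st + 1) / 2).toNat * ((size - st + 1) / 2).toNat)).map (fun t =>
            (st + 2 * ((t / ((size - st + 1) / 2).toNat : Nat) : Int),
             st + 2 * ((t % ((size - st + 1) / 2).toNat : Nat) : Int))) :=
          pvKey (g := fun k : Nat => st + 2 * (k : Int))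
                (p := fun _ : Int => true) (Nat.le_refl _) hp
      _ = _ := by
          apply List.map_congr_left
          intro t _
          simp only [Function.comp_apply, PySem.Int.floordiv_natCast, PySem.Int.mod_natCast]
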